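-- pv_equiv track=rewrite | github.com/ftsrg/cir-demo | xcfa-mapper/test/esbmc_cir_check.py | summarize_clang_failure
-- ===== SOURCE A (Python) =====
-- def summarize_clang_failure(stderr_text: str, stdout_text: str) -> str:
--     combined = "\n".join(part for part in [stderr_text, stdout_text] if part)
--     lines = [line.strip() for line in combined.splitlines() if line.strip()]
--
--     for line in lines:
--         lowered = line.lower()
--         if " error:" in lowered or lowered.startswith("error:") or " fatal error:" in lowered or lowered.startswith("fatal error:"):
--             return line
--
--     for line in lines:
--         if "warning: argument unused during compilation: '-S'" in line:
--             continue
--         return line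
--
--     return ""
-- ===== SOURCE B (Python) =====
-- def summarize_clang_failure(stderr_text: str, stdout_text: str) -> str:
--     combined = "\n".join(part for part in [stderr_text, stdout_text] if part)
--     fallback = None
--     for raw in combined.splitlines():
--         line = raw.strip()
--         if not line:
--             continue
--         lowered = line.lower()
--         if " error:" in lowered or lowered.startswith("error:") or " fatal error:" in lowered or lowered.startswith("fatal error:"):
--             return line
--         if fallback is None and "warning: argument unused during compilation: '-S'" not in line:
--             fallback = line
--     return fallback if fallback is not None else ""
-- ===== Notes on version B (the rewrite author's own statement) =====
-- stated objective: simpler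
-- what changed: Fuses A's list-building preprocessing and its two sequential full scans (error pass, then fallback pass) into one stateful pass that strips/skips lines on the fly, returns an error line immediately and records the first acceptable fallback line.
import Mathlib
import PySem

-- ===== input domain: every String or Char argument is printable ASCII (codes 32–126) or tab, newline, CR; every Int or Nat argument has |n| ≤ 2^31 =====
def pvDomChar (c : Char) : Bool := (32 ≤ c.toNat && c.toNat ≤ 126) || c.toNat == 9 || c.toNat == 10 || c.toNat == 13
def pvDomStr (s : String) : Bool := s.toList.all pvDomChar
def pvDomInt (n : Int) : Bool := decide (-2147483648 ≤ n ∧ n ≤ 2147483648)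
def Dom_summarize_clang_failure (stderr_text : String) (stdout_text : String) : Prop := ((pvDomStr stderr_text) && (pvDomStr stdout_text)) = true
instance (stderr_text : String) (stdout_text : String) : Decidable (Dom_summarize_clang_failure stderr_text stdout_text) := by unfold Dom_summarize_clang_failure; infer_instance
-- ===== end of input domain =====

-- B fuses A's list-building and its two sequential scans into one stateful pass (objective: simpler; same return value).

-- ===== PORT A =====
def summarize_clang_failure (stderr_text : String) (stdout_text : String) : String :=
  let combined := PySem.Str.join "\n" ([stderr_text, stdout_text].filter (fun part => !(part == "")))
  let lines := ((PySem.Str.splitlines combined).filter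
      (fun line => !(PySem.Str.strip line == ""))).map (fun line => PySem.Str.strip line)
  match lines.find? (fun line =>
      let lowered := PySem.Str.lower line
      PySem.Str.isIn " error:" lowered || PySem.Str.startswith lowered "error:" ||
      PySem.Str.isIn " fatal error:" lowered || PySem.Str.startswith lowered "fatal error:") with
  | some line => line
  | none =>
    match lines.find? (fun line =>
        !(PySem.Str.isIn "warning: argument unused during compilation: '-S'" line)) with
    | some line => line
    | none => ""

-- ===== PORT B =====
-- one pass: strip each raw line, skip blanks, return an error line at once, record the first fallback
def summarizeAltGo (rawLines : List String) (fallback : Option String) : String :=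
  match rawLines with
  | [] => match fallback with | some f => f | none => ""
  | raw :: rest =>
    let line := PySem.Str.strip raw
    if line == "" then summarizeAltGo rest fallback
    else
      let lowered := PySem.Str.lower line
      if PySem.Str.isIn " error:" lowered || PySem.Str.startswith lowered "error:" ||
         PySem.Str.isIn " fatal error:" lowered || PySem.Str.startswith lowered "fatal error:" then
        line
      else
        summarizeAltGo rest
          (if fallback.isNone &&
              !(PySem.Str.isIn "warning: argument unused during compilation: '-S'" line)
           then some line else fallback)

def summarize_clang_failure_alt (stderr_text : String) (stdout_text : String) : String :=
  let combined := PySem.Str.join "\n" ([stderr_text, stdout_text].filter (fun part => !(part == "")))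
  summarizeAltGo (PySem.Str.splitlines combined) none

-- ===== PRECONDITION & SPEC =====
def Spec_summarize_clang_failure (stderr_text : String) (stdout_text : String) (out : String) : Prop := out = summarize_clang_failure_alt stderr_text stdout_text
instance (stderr_text : String) (stdout_text : String) (out : String) : Decidable (Spec_summarize_clang_failure stderr_text stdout_text out) := by unfold Spec_summarize_clang_failure; infer_instance

-- ===== CLAIM (what is proved, stated in full; the proofs are below) =====
def Claim_equal_summarize_clang_failure : Prop := ∀ (stderr_text : String) (stdout_text : String), Dom_summarize_clang_failure stderr_text stdout_text → Spec_summarize_clang_failure stderr_text stdout_text (summarize_clang_failure stderr_text stdout_text)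

-- ===== LEMMAS AND PROOFS =====

def pvErr (line : String) : Bool :=
  let lowered := PySem.Str.lower line
  PySem.Str.isIn " error:" lowered || PySem.Str.startswith lowered "error:" ||
  PySem.Str.isIn " fatal error:" lowered || PySem.Str.startswith lowered "fatal error:"

def pvKeep (line : String) : Bool :=
  !(PySem.Str.isIn "warning: argument unused during compilation: '-S'" line)

-- A's two-pass answer over the stripped nonempty lines, with an optional already-recorded fallback
def pvACore (ls : List String) (fb : Option String) : String :=
  let lines := (ls.filter (fun l => !(PySem.Str.strip l == ""))).map (fun l => PySem.Str.strip l)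
  match lines.find? pvErr with
  | some line => line
  | none =>
    match fb with
    | some f => f
    | none => match lines.find? pvKeep with | some line => line | none => ""

theorem summarizeAltGo_eq (ls : List String) (fb : Option String) :
    summarizeAltGo ls fb = pvACore ls fb := by
  induction ls generalizing fb with
  | nil =>
    cases fb <;> simp [summarizeAltGo, pvACore]
  | cons raw rest ih =>
    by_cases h0 : PySem.Str.strip raw = ""
    · simp only [summarizeAltGo]
      rw [if_pos (by simp [h0]), ih]
      simp [pvACore, h0]
    · by_cases herr : pvErr (PySem.Str.strip raw)
      · simp only [summarizeAltGo]
        rw [if_neg (by simp [h0]), if_pos (by simpa [pvErr] using herr)]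
        simp [pvACore, h0, herr]
      · by_cases hkeep : pvKeep (PySem.Str.strip raw)
        · cases fb with
          | none =>
            simp only [summarizeAltGo]
            rw [if_neg (by simp [h0]), if_neg (by simpa [pvErr] using herr)]
            simp only [Option.isNone_none, Bool.true_and]
            rw [if_pos (by simpa [pvKeep] using hkeep)]
            rw [ih]
            simp [pvACore, h0, herr, hkeep]
          | some f =>
            simp only [summarizeAltGo]
            rw [if_neg (by simp [h0]), if_neg (by simpa [pvErr] using herr)]
            simp only [Option.isNone_some, Bool.false_and, if_neg (by simp : ¬ (false = true))]
            rw [ih]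
            simp [pvACore, h0, herr]
        · cases fb with
          | none =>
            simp only [summarizeAltGo]
            rw [if_neg (by simp [h0]), if_neg (by simpa [pvErr] using herr)]
            simp only [Option.isNone_none, Bool.true_and]
            rw [if_neg (by simpa [pvKeep] using hkeep)]
            rw [ih]
            simp [pvACore, h0, herr, hkeep]
          | some f =>
            simp only [summarizeAltGo]
            rw [if_neg (by simp [h0]), if_neg (by simpa [pvErr] using herr)]
            simp only [Option.isNone_some, Bool.false_and, if_neg (by simp : ¬ (false = true))]
            rw [ih]
            simp [pvACore, h0, herr]


set_option maxHeartbeats 1000000 in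
theorem pvA_eq (s t : String) : summarize_clang_failure s t = pvACore (PySem.Str.splitlines (PySem.Str.join "\n" ([s, t].filter (fun part => !(part == ""))))) none := rfl

set_option maxHeartbeats 1000000 in
theorem pvB_eq (s t : String) : summarize_clang_failure_alt s t = summarizeAltGo (PySem.Str.splitlines (PySem.Str.join "\n" ([s, t].filter (fun part => !(part == ""))))) none := rfl

-- ===== VERDICT (by name: the statement is the Claim_ definition above) =====
theorem summarize_clang_failure_spec : Claim_equal_summarize_clang_failure := by
  intro stderr_text stdout_text _
  unfold Spec_summarize_clang_failure
  rw [pvA_eq, pvB_eq, summarizeAltGo_eq]
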